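-- pv_equiv track=rewrite | github.com/GeekGames74/Discord-Bots | Extensions/Evaluation.py | get_comm
-- ===== SOURCE A (Python) =====
-- def get_comm(txt: str) -> (str, str):
--     """
--     Strip the expression of its comments.
--     Also get the last comment (or '').
--     """
--     splitted = [i.strip() for i in txt.split("`")]
--     expr = [splitted[i] for i in range(len(splitted)) if not i%2]
--     txt = "".join([i for i in expr if i]) ; comment = ""
--     if not len(splitted)%2: comment = splitted[-1]
--     elif not splitted[-1]: comment = splitted[-2]
--     if comment: comment = f" `{comment}`"
--     return txt.replace(" ", ""), comment
-- ===== SOURCE B (Python) =====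
-- def get_comm(txt: str) -> (str, str):
--     """
--     Strip the expression of its comments; also get the last comment (or '').
--     Single left-to-right scan with an in_comment flag instead of split/index logic.
--     """
--     in_comment = False
--     parts = []          # stripped texts of the completed outside-comment segments
--     seg = []            # characters of the current segment
--     last_comment = ""   # stripped text of the most recent completed comment
--     for ch in txt:
--         if ch == '`':
--             s = ''.join(seg).strip()
--             if in_comment:
--                 last_comment = s
--             else:
--                 parts.append(s)
--             seg = []
--             in_comment = not in_comment
--         else:
--             seg.append(ch)
--     tail = ''.join(seg).strip()
--     if in_comment:                 # scan ended inside an open comment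
--         comment = tail
--     elif tail == '':               # trailing expression fragment is blank
--         comment = last_comment
--     else:
--         parts.append(tail)
--         comment = ""
--     expr = ''.join(parts).replace(' ', '')
--     if comment:
--         comment = f" `{comment}`"
--     return expr, comment
-- ===== Notes on version B (the rewrite author's own statement) =====
-- stated objective: alternative
-- what changed: Replaced split-on-backtick plus even-index/negative-index selection with a single left-to-right character scan that keeps an in_comment flag, a buffer of outside-comment segments and the last completed comment.
import Mathlib
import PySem

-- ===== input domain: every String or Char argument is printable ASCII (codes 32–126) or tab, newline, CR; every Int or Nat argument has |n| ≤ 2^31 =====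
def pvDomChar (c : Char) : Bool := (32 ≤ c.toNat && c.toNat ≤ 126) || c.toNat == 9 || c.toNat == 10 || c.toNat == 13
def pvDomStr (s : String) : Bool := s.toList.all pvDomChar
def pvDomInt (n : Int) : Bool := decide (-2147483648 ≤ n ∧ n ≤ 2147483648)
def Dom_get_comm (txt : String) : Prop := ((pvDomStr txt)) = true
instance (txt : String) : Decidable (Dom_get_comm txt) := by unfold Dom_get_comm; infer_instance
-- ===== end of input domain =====

-- B replaces A's split-on-backtick + even/negative indexing with one left-to-right
-- scan keeping an in_comment flag (alternative decomposition, same O(n) cost).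


-- ===== PORT A =====
-- Transliteration of A on the List Char side (PySem.Str.* are thin wrappers over
-- PySem.Chars.* on toList).  splitted[-2] when len(splitted) = 1 is an IndexError in
-- Python (excluded by Pre_); pyGetD's default is never read inside Pre_.
def get_comm (txt : String) : String × String :=
  let splitted : List (List Char) :=
    (PySem.Chars.splitOn txt.toList ['`']).map PySem.Chars.strip
  let expr : List (List Char) :=
    (PySem.List.pyRange 0 (splitted.length) 1).foldl
      (fun acc i => if PySem.Int.mod i 2 == 0 then acc ++ [PySem.List.pyGetD splitted i []] else acc) []
  let joined : List Char := PySem.Chars.join [] (expr.filter (fun i => i ≠ []))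
  let comment : List Char :=
    if splitted.length % 2 == 0 then PySem.List.pyGetD splitted (-1) []
    else if PySem.List.pyGetD splitted (-1) [] = [] then PySem.List.pyGetD splitted (-2) []
    else []
  let comment := if comment ≠ [] then ' ' :: '`' :: (comment ++ ['`']) else comment
  (String.ofList (PySem.Chars.replace joined [' '] []), String.ofList comment)

-- ===== PORT B =====
-- scan state: (in_comment, current segment, completed outside segments (stripped), last comment)
def bStep (st : Bool × List Char × List (List Char) × List Char) (ch : Char) :
    Bool × List Char × List (List Char) × List Char :=
  let (inC, seg, parts, last) := st
  if ch = '`' then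
    let s := PySem.Chars.strip seg
    if inC then (false, [], parts, s) else (true, [], parts ++ [s], last)
  else (inC, seg ++ [ch], parts, last)

def get_comm_alt (txt : String) : String × String :=
  let st := txt.toList.foldl bStep (false, [], [], [])
  let inC := st.1
  let seg := st.2.1
  let parts := st.2.2.1
  let last := st.2.2.2
  let tail := PySem.Chars.strip seg
  let pc : List (List Char) × List Char :=
    if inC then (parts, tail)
    else if tail = [] then (parts, last)
    else (parts ++ [tail], [])
  let expr := PySem.Chars.replace (PySem.Chars.join [] pc.1) [' '] []
  let comment := if pc.2 ≠ [] then ' ' :: '`' :: (pc.2 ++ ['`']) else pc.2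
  (String.ofList expr, String.ofList comment)

-- ===== PRECONDITION & SPEC =====
-- Pre_ excludes exactly the inputs where Python A raises IndexError: no backtick and
-- a whitespace-only string (splitted[-2] on a one-element list).
def Pre_get_comm (txt : String) : Prop :=
  '`' ∈ txt.toList ∨ PySem.Str.strip txt ≠ ""
instance (txt : String) : Decidable (Pre_get_comm txt) := by unfold Pre_get_comm; infer_instance

def pvWitness_get_comm : String := "a `b` c"

def Spec_get_comm (txt : String) (out : String × String) : Prop := out = get_comm_alt txt
instance (txt : String) (out : String × String) : Decidable (Spec_get_comm txt out) := by unfold Spec_get_comm; infer_instance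

-- ===== CLAIM (what is proved, stated in full; the proofs are below) =====
def Claim_equal_get_comm : Prop := ∀ (txt : String), Dom_get_comm txt → Pre_get_comm txt → Spec_get_comm txt (get_comm txt)

-- ===== LEMMAS AND PROOFS =====

-- simple structural split on '`' (proof-layer model of both ports' traversals)
def splitC : List Char → List (List Char)
  | [] => [[]]
  | c :: cs => if c = '`' then [] :: splitC cs else (splitC cs).modifyHead (c :: ·)

theorem splitC_ne_nil (cs : List Char) : splitC cs ≠ [] := by
  induction cs with
  | nil => simp [splitC]
  | cons c cs ih =>
    simp only [splitC]
    split
    · simp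
    · cases h : splitC cs with
      | nil => exact absurd h ih
      | cons a t => simp [List.modifyHead]

theorem go_eq (l : List Char) : ∀ (fuel : Nat) (cur : List Char) (acc : List (List Char)),
    l.length < fuel →
    PySem.Chars.splitOn.go ['`'] fuel l cur acc
      = acc.reverse ++ ((splitC l).modifyHead (cur.reverse ++ ·)) := by
  induction l with
  | nil =>
    intro fuel cur acc h
    cases fuel with
    | zero => omega
    | succ f => simp [PySem.Chars.splitOn.go, splitC, List.modifyHead]
  | cons c rest ih =>
    intro fuel cur acc h
    simp only [List.length_cons] at h
    cases fuel with
    | zero => omega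
    | succ f =>
      rw [PySem.Chars.splitOn.go]
      by_cases hc : c = '`'
      · subst hc
        have hpre : List.isPrefixOf ['`'] ('`' :: rest) = true := by
          simp [List.isPrefixOf]
        rw [if_pos hpre]
        have hdrop : List.drop (['`'].length) ('`' :: rest) = rest := by simp
        rw [hdrop, ih f [] (cur.reverse :: acc) (by omega)]
        cases hps : splitC rest with
        | nil => exact absurd hps (splitC_ne_nil rest)
        | cons a t => simp [splitC, List.modifyHead, hps]
      · have hpre : List.isPrefixOf ['`'] (c :: rest) = false := by
          simp [List.isPrefixOf]
          intro hh
          exact absurd hh.symm hc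
        rw [if_neg (by simp [hpre])]
        rw [ih f (c :: cur) acc (by omega)]
        cases hps : splitC rest with
        | nil => exact absurd hps (splitC_ne_nil rest)
        | cons a t =>
          simp [splitC, List.modifyHead, hps, hc]

theorem splitOn_eq (cs : List Char) : PySem.Chars.splitOn cs ['`'] = splitC cs := by
  rw [PySem.Chars.splitOn, go_eq cs (cs.length + 1) [] [] (by omega)]
  cases hps : splitC cs with
  | nil => exact absurd hps (splitC_ne_nil cs)
  | cons a t => simp [List.modifyHead]

-- even-indexed elements (A's comprehension)
def evens : List (List Char) → List (List Char)
  | [] => []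
  | [p] => [p]
  | p :: _ :: rest => p :: evens rest

-- A's comment selection as a function of the stripped pieces and a "previous comment"
def Cfun (last : List Char) (S : List (List Char)) : List Char :=
  if S.length % 2 == 0 then PySem.List.pyGetD S (-1) []
  else if PySem.List.pyGetD S (-1) [] = [] then
    (if S.length = 1 then last else PySem.List.pyGetD S (-2) [])
  else []

-- B's scan, reformulated over the pieces of splitC
def finState : Bool → List Char → List (List Char) → List Char → List (List Char) →
    Bool × List Char × List (List Char) × List Char
  | inC, seg, parts, last, [] => (inC, seg, parts, last)
  | inC, seg, parts, last, [p] => (inC, seg ++ p, parts, last)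
  | inC, seg, parts, last, p :: q :: rest =>
      if inC then finState false [] parts (PySem.Chars.strip (seg ++ p)) (q :: rest)
      else finState true [] (parts ++ [PySem.Chars.strip (seg ++ p)]) last (q :: rest)

def Bfinal (st : Bool × List Char × List (List Char) × List Char) :
    List (List Char) × List Char :=
  let tail := PySem.Chars.strip st.2.1
  if st.1 then (st.2.2.1, tail)
  else if tail = [] then (st.2.2.1, st.2.2.2)
  else (st.2.2.1 ++ [tail], [])

theorem finState_shift (c : Char) (ps : List (List Char)) (hps : ps ≠ [])
    (inC : Bool) (seg : List Char) (parts : List (List Char)) (last : List Char) :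
    finState inC seg parts last (ps.modifyHead (c :: ·))
      = finState inC (seg ++ [c]) parts last ps := by
  match ps with
  | [] => exact absurd rfl hps
  | [p] => simp [List.modifyHead, finState]
  | p :: q :: rest => simp [List.modifyHead, finState]

theorem scan_eq (cs : List Char) :
    ∀ (inC : Bool) (seg : List Char) (parts : List (List Char)) (last : List Char),
    cs.foldl bStep (inC, seg, parts, last) = finState inC seg parts last (splitC cs) := by
  induction cs with
  | nil => intro inC seg parts last; simp [splitC, finState]
  | cons c cs ih =>
    intro inC seg parts last
    by_cases hc : c = '`'
    · subst hc
      cases hps : splitC cs with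
      | nil => exact absurd hps (splitC_ne_nil cs)
      | cons a t =>
        cases inC <;>
          simp [List.foldl_cons, bStep, ih, splitC, hps, finState]
    · simp only [List.foldl_cons, bStep, if_neg hc, splitC, ih]
      exact (finState_shift c (splitC cs) (splitC_ne_nil cs) inC seg parts last).symm

theorem getD_neg1 (xs : List (List Char)) (h : xs ≠ []) :
    PySem.List.pyGetD xs (-1) [] = xs.getLast?.getD [] := by
  have hn : 1 ≤ xs.length := by cases xs; simp at h; simp
  simp only [PySem.List.pyGetD, PySem.List.pyGet?, PySem.List.pyIdx?]
  rw [if_neg (by omega), if_pos (by omega)]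
  simp [List.getLast?_eq_getElem?]

theorem getD_neg1_cons_cons (a b : List Char) (S : List (List Char)) (h : S ≠ []) :
    PySem.List.pyGetD (a :: b :: S) (-1) [] = PySem.List.pyGetD S (-1) [] := by
  rw [getD_neg1 _ (by simp), getD_neg1 _ h]
  rw [List.getLast?_cons_cons]
  cases S with
  | nil => exact absurd rfl h
  | cons x t => rw [List.getLast?_cons_cons]

theorem getD_neg2 (xs : List (List Char)) (h : 2 ≤ xs.length) :
    PySem.List.pyGetD xs (-2) [] = (xs[xs.length - 2]?).getD [] := by
  simp only [PySem.List.pyGetD, PySem.List.pyGet?, PySem.List.pyIdx?]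
  rw [if_neg (by omega), if_pos (by omega)]
  simp

theorem getD_neg2_len1 (S : List (List Char)) (h : S.length = 1) :
    PySem.List.pyGetD S (-2) [] = [] := by
  simp only [PySem.List.pyGetD, PySem.List.pyGet?, PySem.List.pyIdx?, h]
  norm_num

theorem Cfun_shift (sp sq : List Char) (S : List (List Char)) (h : S ≠ []) (last : List Char) :
    Cfun last (sp :: sq :: S) = Cfun sq S := by
  unfold Cfun
  rw [getD_neg1_cons_cons _ _ _ h]
  have hpar : (((sp :: sq :: S).length % 2 == 0) : Bool) = ((S.length % 2 == 0) : Bool) := by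
    simp only [List.length_cons]
    simp
    omega
  rw [hpar]
  by_cases hev : S.length % 2 = 0
  · simp [hev]
  · rw [if_neg (show ¬ ((S.length % 2 == 0) = true) by simp [hev])]
    by_cases hz : PySem.List.pyGetD S (-1) [] = []
    · rw [if_pos hz]
      rw [if_neg (show ¬ (sp :: sq :: S).length = 1 by simp)]
      by_cases h1 : S.length = 1
      · rw [getD_neg2 _ (by simp)]
        have e : (sp :: sq :: S).length - 2 = 1 := by simp [h1]
        rw [e]
        simp [hz, h1]
      · have hS2 : 2 ≤ S.length := by
          rcases S with _ | ⟨x, t⟩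
          · exact absurd rfl h
          · rcases t with _ | ⟨y, u⟩
            · simp at h1
            · simp
        rw [getD_neg2 _ (by simp)]
        have e1 : (sp :: sq :: S).length - 2 = (S.length - 2) + 2 := by
          simp only [List.length_cons]; omega
        rw [e1]
        simp only [List.getElem?_cons_succ]
        rw [← getD_neg2 _ hS2]
        simp [hev, hz, h1]
    · simp [hev, hz]

theorem Tlem (ps : List (List Char)) : ∀ (parts : List (List Char)) (last : List Char),
    ps ≠ [] →
    (Bfinal (finState false [] parts last ps)).1.flatten
        = parts.flatten ++ (evens (ps.map PySem.Chars.strip)).flatten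
      ∧ (Bfinal (finState false [] parts last ps)).2
        = Cfun last (ps.map PySem.Chars.strip) := by
  induction ps using evens.induct with
  | case1 => intro parts last hne; exact absurd rfl hne
  | case2 p =>
    intro parts last _
    simp only [finState, Bfinal, List.nil_append, List.map]
    by_cases hz : PySem.Chars.strip p = []
    · simp [hz, Cfun, evens, getD_neg1]
    · simp [hz, Cfun, evens, getD_neg1]
  | case3 p q rest ih =>
    intro parts last _
    cases rest with
    | nil =>
      simp only [finState, if_neg Bool.false_ne_true, List.nil_append, Bfinal, List.map]
      simp [Cfun, evens, getD_neg1]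
    | cons r rest' =>
      have step : finState false [] parts last (p :: q :: r :: rest')
          = finState false [] (parts ++ [PySem.Chars.strip p]) (PySem.Chars.strip q)
              (r :: rest') := by
        simp [finState]
      rw [step]
      obtain ⟨e1, e2⟩ := ih (parts ++ [PySem.Chars.strip p]) (PySem.Chars.strip q) (by simp)
      refine ⟨?_, ?_⟩
      · rw [e1]
        simp [evens]
      · rw [e2]
        rw [show (p :: q :: r :: rest').map PySem.Chars.strip
            = PySem.Chars.strip p :: PySem.Chars.strip q
                :: (r :: rest').map PySem.Chars.strip from rfl]
        rw [Cfun_shift _ _ _ (by simp)]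

theorem getD_append_len (pre : List (List Char)) (p : List Char) (suf : List (List Char)) :
    PySem.List.pyGetD (pre ++ p :: suf) (pre.length) [] = p := by
  rw [PySem.List.pyGetD_natCast]
  simp [List.getD]

theorem modcast (k : Nat) : PySem.Int.mod (k : Int) 2 = ((k % 2 : Nat) : Int) :=
  PySem.Int.mod_natCast k 2

theorem Q (rest : List (List Char)) : ∀ (pre : List (List Char)), pre.length % 2 = 0 →
    ((PySem.List.pyRange (pre.length) (pre.length + rest.length) 1).filter
        (fun i => PySem.Int.mod i 2 == 0)).map (fun i => PySem.List.pyGetD (pre ++ rest) i [])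
      = evens rest := by
  induction rest using evens.induct with
  | case1 =>
    intro pre h
    simp [PySem.List.pyRange, evens]
  | case2 p =>
    intro pre h
    have h1 : (pre.length : Int) < pre.length + [p].length := by simp
    rw [PySem.List.pyRange_one_cons h1]
    have h2 : PySem.List.pyRange ((pre.length : Int) + 1) (pre.length + [p].length) = [] := by
      simp [PySem.List.pyRange]
    rw [h2, List.filter_cons]
    rw [show (PySem.Int.mod (pre.length : Int) 2 == 0) = true by
      rw [modcast]; simp [h]]
    simp [evens]
  | case3 p q rest ih =>
    intro pre h
    have h1 : (pre.length : Int) < pre.length + (p :: q :: rest).length := by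
      simp only [List.length_cons]; push_cast; omega
    rw [PySem.List.pyRange_one_cons h1]
    have h2 : (pre.length : Int) + 1 < pre.length + (p :: q :: rest).length := by
      simp only [List.length_cons]; push_cast; omega
    rw [PySem.List.pyRange_one_cons h2]
    rw [List.filter_cons, List.filter_cons]
    rw [show (PySem.Int.mod (pre.length : Int) 2 == 0) = true by
      rw [modcast]; simp [h]]
    rw [show (PySem.Int.mod ((pre.length : Int) + 1) 2 == 0) = false by
      rw [show ((pre.length : Int) + 1) = ((pre.length + 1 : Nat) : Int) by push_cast; ring]
      rw [modcast]
      have : (pre.length + 1) % 2 = 1 := by omega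
      simp [this]]
    simp only [Bool.false_eq_true, if_true, if_false, List.map_cons]
    have e3 : (pre.length : Int) + 1 + 1 = ((pre ++ [p, q]).length : Int) := by
      simp; ring
    have e4 : (pre.length : Int) + ((p :: q :: rest).length : Int)
        = ((pre ++ [p, q]).length : Int) + rest.length := by
      simp; ring
    have e5 : pre ++ p :: q :: rest = (pre ++ [p, q]) ++ rest := by simp
    rw [e5, e3, e4, ih (pre ++ [p, q]) (by simp; omega)]
    rw [show pre ++ [p, q] ++ rest = pre ++ p :: q :: rest by simp]
    rw [getD_append_len]
    rfl

theorem join_nil_eq_flatten (xs : List (List Char)) : PySem.Chars.join [] xs = xs.flatten := by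
  induction xs with
  | nil => rfl
  | cons a t ih =>
    simp only [PySem.Chars.join, List.intercalate] at *
    cases t <;> simp_all [List.intersperse]

theorem flatten_filter_ne_nil (xs : List (List Char)) :
    (xs.filter (fun i => i ≠ [])).flatten = xs.flatten := by
  simp only [ne_eq, decide_not]
  induction xs with
  | nil => rfl
  | cons a t ih =>
    rw [List.filter_cons]
    by_cases h : a = [] <;> simp [h, ih]

theorem main_eq (txt : String) : get_comm txt = get_comm_alt txt := by
  unfold get_comm get_comm_alt
  rw [splitOn_eq, scan_eq]
  have hne : splitC txt.toList ≠ [] := splitC_ne_nil _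
  set ps := splitC txt.toList with hps
  set S := ps.map PySem.Chars.strip with hS
  obtain ⟨e1, e2⟩ := Tlem ps [] [] hne
  have hC : Bfinal (finState false [] [] [] ps)
      = (if (finState false [] [] [] ps).1 then
            ((finState false [] [] [] ps).2.2.1, PySem.Chars.strip (finState false [] [] [] ps).2.1)
          else if PySem.Chars.strip (finState false [] [] [] ps).2.1 = [] then
            ((finState false [] [] [] ps).2.2.1, (finState false [] [] [] ps).2.2.2)
          else ((finState false [] [] [] ps).2.2.1 ++ [PySem.Chars.strip (finState false [] [] [] ps).2.1], [])) := rfl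
  have hexpr : (PySem.List.pyRange 0 (S.length) 1).foldl
      (fun acc i => if PySem.Int.mod i 2 == 0 then acc ++ [PySem.List.pyGetD S i []] else acc) []
      = evens S := by
    rw [PySem.List.foldl_append_if]
    have := Q S [] rfl
    simpa using this
  have hcomm : (if S.length % 2 == 0 then PySem.List.pyGetD S (-1) []
      else if PySem.List.pyGetD S (-1) [] = [] then PySem.List.pyGetD S (-2) []
      else []) = Cfun [] S := by
    unfold Cfun
    by_cases h1 : S.length = 1
    · simp [h1, getD_neg2_len1 S h1]
    · simp [h1]
  simp only [hexpr, hcomm, ← hC]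
  rw [join_nil_eq_flatten, flatten_filter_ne_nil, join_nil_eq_flatten, e1, e2]
  simp [hS]

-- ===== VERDICT (by name: the statement is the Claim_ definition above) =====
theorem get_comm_spec : Claim_equal_get_comm := by
  intro txt _ _
  exact main_eq txt
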